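-- pv_equiv track=rewrite | github.com/Landygit/Ole | A1_SDS_124090481.py | find_next_word_start
-- ===== SOURCE A (Python) =====
-- def find_next_word_start(s, pos):
--     n = len(s)
--     if pos >= n:
--         return pos
--     i = pos
--     # skip current word
--     while i < n and s[i] != ' ':
--         i += 1
--     # skip spaces
--     while i < n and s[i] == ' ':
--         i += 1
--     return i
-- ===== SOURCE B (Python) =====
-- def find_next_word_start(s, pos):
--     # Slice-and-scan rewrite: one slice, one find, one lstrip -- no index loop.
--     n = len(s)
--     if pos >= n:
--         return pos
--     rest = s[pos:]
--     sp = rest.find(' ')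
--     if sp == -1:
--         return n
--     return n - len(rest[sp:].lstrip(' '))
-- ===== Notes on version B (the rewrite author's own statement) =====
-- stated objective: idiomatic
-- what changed: Replaced the two manual index-stepping while-loops with a single slice plus str.find(' ') for the word and str.lstrip(' ') for the space run, computing the result arithmetically from the remaining length (constant-factor speedup: C-level scanning instead of a Python-level per-character loop).
-- outside the precondition, e.g. on find_next_word_start('a b', -2): A returns -1, B returns 2
import Mathlib
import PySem

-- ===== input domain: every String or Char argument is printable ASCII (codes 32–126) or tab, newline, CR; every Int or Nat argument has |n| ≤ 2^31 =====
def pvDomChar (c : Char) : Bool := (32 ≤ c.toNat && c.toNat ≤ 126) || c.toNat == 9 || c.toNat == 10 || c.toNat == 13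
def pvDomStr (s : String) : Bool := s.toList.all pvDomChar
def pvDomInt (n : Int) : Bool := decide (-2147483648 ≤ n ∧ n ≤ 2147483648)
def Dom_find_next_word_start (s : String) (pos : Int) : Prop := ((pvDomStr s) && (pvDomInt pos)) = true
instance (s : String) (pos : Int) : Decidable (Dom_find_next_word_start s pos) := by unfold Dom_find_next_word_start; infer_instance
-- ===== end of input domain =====

-- B replaces A's two index-stepping while-loops by one slice + find(' ') + lstrip(' ') (idiomatic, no index loop).

-- ===== PORT A =====
-- while i < n and s[i] != ' ': i += 1
def pvAWord (cs : List Char) (n i : Int) : Int :=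
  if h : i < n then
    match PySem.List.pyGet? cs i with
    | some c => if c ≠ ' ' then pvAWord cs n (i + 1) else i
    | none => i      -- Python raises IndexError here (only reachable for pos < -len(s)); outside Pre_
  else i
termination_by (n - i).toNat
decreasing_by omega

-- while i < n and s[i] == ' ': i += 1
def pvASpace (cs : List Char) (n i : Int) : Int :=
  if h : i < n then
    match PySem.List.pyGet? cs i with
    | some c => if c = ' ' then pvASpace cs n (i + 1) else i
    | none => i      -- Python raises IndexError here; outside Pre_
  else i
termination_by (n - i).toNat
decreasing_by omega

def find_next_word_start (s : String) (pos : Int) : Int :=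
  let n : Int := (s.toList.length : Int)
  if pos ≥ n then pos
  else pvASpace s.toList n (pvAWord s.toList n pos)

-- ===== PORT B =====
def find_next_word_start_alt (s : String) (pos : Int) : Int :=
  let n : Int := (s.toList.length : Int)
  if pos ≥ n then pos
  else
    let rest := PySem.List.slice s.toList (some pos) none        -- rest = s[pos:]
    let sp := PySem.Chars.find rest [' ']                        -- sp = rest.find(' ')
    if sp = -1 then n
    -- rest[sp:].lstrip(' ') ported by hand as dropWhile (· == ' '): exact, lstrip(' ') drops exactly the leading spaces
    else n - (((PySem.List.slice rest (some sp) none).dropWhile (fun c => c == ' ')).length : Int)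

-- ===== PRECONDITION & SPEC =====
-- Pre_ excludes negative pos: a scan position is a nonnegative index and the function is unspecified there;
-- A's values for -len(s) <= pos < 0 come from accidental negative-index wraparound (it can even return a
-- negative index) and A raises IndexError below -len(s), while B scans the suffix s[pos:] without wrapping.
def Pre_find_next_word_start (s : String) (pos : Int) : Prop := 0 ≤ pos
instance (s : String) (pos : Int) : Decidable (Pre_find_next_word_start s pos) := by unfold Pre_find_next_word_start; infer_instance
def pvWitness_find_next_word_start : String × Int := ("a b", 0)

def Spec_find_next_word_start (s : String) (pos : Int) (out : Int) : Prop := out = find_next_word_start_alt s pos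
instance (s : String) (pos : Int) (out : Int) : Decidable (Spec_find_next_word_start s pos out) := by unfold Spec_find_next_word_start; infer_instance

-- ===== CLAIM (what is proved, stated in full; the proofs are below) =====
def Claim_equal_find_next_word_start : Prop := ∀ (s : String) (pos : Int), Dom_find_next_word_start s pos → Pre_find_next_word_start s pos → Spec_find_next_word_start s pos (find_next_word_start s pos)

-- ===== LEMMAS AND PROOFS =====

-- [c] is a prefix of m iff m starts with c
theorem pvSingleton_prefix (m : List Char) (c : Char) : [c] <+: m ↔ m.head? = some c := by
  cases m with
  | nil => simp
  | cons x xs => simp [List.cons_prefix_cons, eq_comm]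

-- [c] is an infix of l iff c ∈ l
theorem pvSingleton_infix (l : List Char) (c : Char) : [c] <:+: l ↔ c ∈ l := by
  constructor
  · intro h; exact h.mem (List.mem_singleton_self c)
  · intro h
    obtain ⟨u, v, huv⟩ := List.append_of_mem h
    exact ⟨u, v, by simp [huv]⟩

-- the first occurrence of c in l sits right after takeWhile (· ≠ c)
theorem pvFirstOcc (l : List Char) (c : Char) (h : c ∈ l) :
    (l.drop ((l.takeWhile (fun x => !(x == c))).length)).head? = some c ∧
    ∀ i < (l.takeWhile (fun x => !(x == c))).length, l[i]? ≠ some c := by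
  induction l with
  | nil => cases h
  | cons x xs ih =>
    by_cases hx : x = c
    · subst hx; simp
    · have hc : c ∈ xs := by
        rcases List.mem_cons.mp h with h1 | h1
        · exact absurd h1.symm hx
        · exact h1
      obtain ⟨h1, h2⟩ := ih hc
      have hp : (!(x == c)) = true := by simp [hx]
      simp only [List.takeWhile_cons, hp, if_pos]
      refine ⟨?_, ?_⟩
      · simpa only [List.length_cons, List.drop_succ_cons] using h1
      · intro i hi
        simp only [List.length_cons] at hi
        cases i with
        | zero => simp [hx]
        | succ j => simpa using h2 j (by omega)

-- characterisation of rest.find(' ') for a single-character needle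
theorem pvFindChar (l : List Char) (c : Char) :
    PySem.Chars.find l [c] =
      if c ∈ l then ((l.takeWhile (fun x => !(x == c))).length : Int) else -1 := by
  by_cases h : c ∈ l
  · simp only [h, if_true]
    have hnn : 0 ≤ PySem.Chars.find l [c] := by
      rw [PySem.Chars.find_nonneg_iff]; exact (pvSingleton_infix l c).mpr h
    obtain ⟨hpre, hmin⟩ := PySem.Chars.find_spec (s := l) (sub := [c]) hnn
    obtain ⟨h1, h2⟩ := pvFirstOcc l c h
    set j := (l.takeWhile (fun x => !(x == c))).length with hj
    have hj1 : [c] <+: l.drop j := (pvSingleton_prefix _ _).mpr h1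
    have hj2 : ∀ i < j, ¬ [c] <+: l.drop i := by
      intro i hi hp
      exact h2 i hi (by rw [← List.head?_drop]; exact (pvSingleton_prefix _ _).mp hp)
    have heq : (PySem.Chars.find l [c]).toNat = j := by
      rcases Nat.lt_trichotomy (PySem.Chars.find l [c]).toNat j with hlt | heq | hgt
      · exact absurd hpre (hj2 _ hlt)
      · exact heq
      · exact absurd hj1 (hmin _ hgt)
    omega
  · simp only [h, if_false]
    rw [PySem.Chars.find_eq_neg_one_iff]
    intro hinf; exact h ((pvSingleton_infix l c).mp hinf)

-- the word-skipping loop of A computed as a takeWhile length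
theorem pvAWord_eq (cs : List Char) : ∀ (m k : Nat), cs.length - k = m → k ≤ cs.length →
    pvAWord cs (cs.length : Int) (k : Int) =
      (k : Int) + (((cs.drop k).takeWhile (fun x => !(x == ' '))).length : Int) := by
  intro m
  induction m with
  | zero =>
    intro k hm hk
    have hke : k = cs.length := by omega
    subst hke
    rw [pvAWord]
    simp
  | succ m ih =>
    intro k hm hk
    have hlt : k < cs.length := by omega
    rw [pvAWord]
    rw [dif_pos (by exact_mod_cast hlt)]
    rw [PySem.List.pyGet?_natCast, List.getElem?_eq_getElem hlt]
    rw [List.drop_eq_getElem_cons hlt, List.takeWhile_cons]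
    by_cases hc : cs[k] = ' '
    · simp [hc]
    · simp only [hc, Bool.not_eq_true', beq_eq_false_iff_ne, ne_eq, not_false_eq_true,
        if_pos, List.length_cons]
      have : ((k : Int) + 1) = ((k + 1 : Nat) : Int) := by push_cast; ring
      rw [this, ih (k + 1) (by omega) (by omega)]
      push_cast [List.length_cons]; omega

-- the space-skipping loop of A computed as a takeWhile length
theorem pvASpace_eq (cs : List Char) : ∀ (m k : Nat), cs.length - k = m → k ≤ cs.length →
    pvASpace cs (cs.length : Int) (k : Int) =
      (k : Int) + (((cs.drop k).takeWhile (fun x => x == ' ')).length : Int) := by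
  intro m
  induction m with
  | zero =>
    intro k hm hk
    have hke : k = cs.length := by omega
    subst hke
    rw [pvASpace]
    simp
  | succ m ih =>
    intro k hm hk
    have hlt : k < cs.length := by omega
    rw [pvASpace]
    rw [dif_pos (by exact_mod_cast hlt)]
    rw [PySem.List.pyGet?_natCast, List.getElem?_eq_getElem hlt]
    rw [List.drop_eq_getElem_cons hlt, List.takeWhile_cons]
    by_cases hc : cs[k] = ' '
    · simp only [hc, beq_self_eq_true]
      have : ((k : Int) + 1) = ((k + 1 : Nat) : Int) := by push_cast; ring
      rw [this, ih (k + 1) (by omega) (by omega)]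
      push_cast [List.length_cons]; omega
    · simp [hc]

-- ===== VERDICT (by name: the statement is the Claim_ definition above) =====
theorem find_next_word_start_spec : Claim_equal_find_next_word_start := by
  intro s pos _ hpre
  unfold Spec_find_next_word_start
  unfold Pre_find_next_word_start at hpre
  set cs := s.toList with hcs
  by_cases hge : pos ≥ (cs.length : Int)
  · simp [find_next_word_start, find_next_word_start_alt, ← hcs, hge]
  · -- 0 ≤ pos < len s : write pos as a Nat k
    obtain ⟨k, hk⟩ : ∃ k : Nat, pos = (k : Int) := ⟨pos.toNat, (Int.toNat_of_nonneg hpre).symm⟩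
    subst hk
    have hklt : k < cs.length := by exact_mod_cast not_le.mp hge
    simp only [find_next_word_start, find_next_word_start_alt, ← hcs, if_neg hge,
      PySem.List.slice_from_natCast]
    set rest := cs.drop k with hrest
    have hrl : rest.length = cs.length - k := by simp [hrest]
    -- A's two loops
    set t1 := (rest.takeWhile (fun x => !(x == ' '))).length with ht1
    have ht1le : t1 ≤ rest.length := (List.takeWhile_prefix _).length_le
    have hA1 : pvAWord cs (cs.length : Int) (k : Int) = (k : Int) + (t1 : Int) :=
      pvAWord_eq cs (cs.length - k) k rfl (by omega)
    set t2 := ((cs.drop (k + t1)).takeWhile (fun x => x == ' ')).length with ht2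
    have ht2le : t2 ≤ cs.length - (k + t1) := by
      have := (List.takeWhile_prefix (l := cs.drop (k + t1)) (fun x => x == ' ')).length_le
      simp only [List.length_drop] at this
      omega
    have hA2 : pvASpace cs (cs.length : Int) ((k : Int) + (t1 : Int)) =
        (k : Int) + (t1 : Int) + (t2 : Int) := by
      have : (k : Int) + (t1 : Int) = ((k + t1 : Nat) : Int) := by push_cast; ring
      rw [this, pvASpace_eq cs (cs.length - (k + t1)) (k + t1) rfl (by omega)]
    rw [hA1, hA2, pvFindChar]
    by_cases hmem : ' ' ∈ rest
    · -- a space exists in rest: find = t1, and both sides are k + t1 + t2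
      simp only [hmem, if_true]
      rw [if_neg (by omega), PySem.List.slice_from_natCast (a := t1) (xs := rest)]
      have hdd : rest.drop t1 = cs.drop (k + t1) := by
        rw [hrest, List.drop_drop]
      rw [hdd]
      have hsplit : ((cs.drop (k + t1)).takeWhile (fun x => x == ' ')).length +
          ((cs.drop (k + t1)).dropWhile (fun x => x == ' ')).length =
          (cs.drop (k + t1)).length := by
        rw [← List.length_append, List.takeWhile_append_dropWhile]
      have hld : (cs.drop (k + t1)).length = cs.length - (k + t1) := by simp
      omega
    · -- no space in rest: A runs to the end of the string, B returns n
      simp only [hmem, if_false]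
      have hall : rest.takeWhile (fun x => !(x == ' ')) = rest := by
        apply List.takeWhile_eq_self_iff.mpr
        intro x hx
        simp only [Bool.not_eq_true', beq_eq_false_iff_ne, ne_eq]
        exact fun he => hmem (he ▸ hx)
      have ht1eq : t1 = rest.length := by rw [ht1, hall]
      have hd : cs.drop (k + t1) = [] := by
        apply List.drop_eq_nil_of_le; omega
      have ht2z : t2 = 0 := by rw [ht2, hd]; simp
      push_cast; omega
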